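-- pv_equiv track=rewrite | github.com/marin-jovanovic/top-down-operator-precedence | lexer_generator/regex_manager.py | is_escaped_at_index
-- ===== SOURCE A (Python) =====
-- def is_escaped_at_index(s, index):
--
--     s = s[:index]
--
--     count = 0
--     for i_0 in reversed(s):
--         if i_0 != "\\":
--             break
--         else:
--             count += 1
--
--     return not (count + 1) % 2 == 0
-- ===== SOURCE B (Python) =====
-- def is_escaped_at_index(s, index):
--     # Forward single-pass DFA: scan the prefix left-to-right, tracking
--     # whether the *next* character would be escaped.  A backslash escapes
--     # the following char unless it is itself escaped.
--     esc = False
--     for c in s[:index]: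
--         esc = (c == "\\") and not esc
--     return not esc
-- ===== Notes on version B (the rewrite author's own statement) =====
-- stated objective: alternative
-- what changed: Replaces A's backward scan (reversed loop with break counting trailing backslashes, then a parity test) by a forward single-pass escape-state automaton: one boolean flag 'esc' updated left-to-right as esc = (c=='\\') and not esc, returning not esc.
import Mathlib
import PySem

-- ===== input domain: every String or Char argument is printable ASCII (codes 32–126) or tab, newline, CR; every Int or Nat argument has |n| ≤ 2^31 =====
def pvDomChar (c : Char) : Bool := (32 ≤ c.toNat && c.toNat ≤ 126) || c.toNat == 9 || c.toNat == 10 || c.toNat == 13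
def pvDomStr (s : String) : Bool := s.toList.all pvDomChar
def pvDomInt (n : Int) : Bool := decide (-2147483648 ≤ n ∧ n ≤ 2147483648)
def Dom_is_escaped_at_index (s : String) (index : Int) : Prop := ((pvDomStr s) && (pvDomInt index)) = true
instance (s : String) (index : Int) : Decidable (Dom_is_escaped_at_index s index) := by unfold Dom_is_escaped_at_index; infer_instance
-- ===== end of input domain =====

-- B replaces A's backward trailing-backslash count by a forward single-pass
-- escape-state automaton over the prefix; objective: alternative.

-- ===== PORT A =====
-- the 'for i_0 in reversed(s): if i_0 != "\\": break else: count += 1' loop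
def pvCountLoopA : List Char → Nat → Nat
  | [], count => count
  | c :: rest, count => if c ≠ '\\' then count else pvCountLoopA rest (count + 1)

def is_escaped_at_index (s : String) (index : Int) : Bool :=
  let s' := PySem.List.slice s.toList none (some index)   -- s = s[:index]
  let count := pvCountLoopA s'.reverse 0
  !(PySem.Int.mod ((count : Int) + 1) 2 == 0)

-- ===== PORT B =====
def is_escaped_at_index_alt (s : String) (index : Int) : Bool :=
  let prefixL := PySem.List.slice s.toList none (some index)        -- s[:index]
  let esc := prefixL.foldl (fun esc c => (c == '\\') && !esc) false
  !esc

-- ===== PRECONDITION & SPEC =====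
def Spec_is_escaped_at_index (s : String) (index : Int) (out : Bool) : Prop := out = is_escaped_at_index_alt s index
instance (s : String) (index : Int) (out : Bool) : Decidable (Spec_is_escaped_at_index s index out) := by unfold Spec_is_escaped_at_index; infer_instance

-- ===== CLAIM (what is proved, stated in full; the proofs are below) =====
def Claim_equal_is_escaped_at_index : Prop := ∀ (s : String) (index : Int), Dom_is_escaped_at_index s index → Spec_is_escaped_at_index s index (is_escaped_at_index s index)

-- ===== LEMMAS AND PROOFS =====

-- A's loop counts the leading backslashes of its (reversed) input
theorem pvCountLoopA_eq (l : List Char) (n : Nat) :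
    pvCountLoopA l n = n + (l.takeWhile (· == '\\')).length := by
  induction l generalizing n with
  | nil => simp [pvCountLoopA]
  | cons c rest ih =>
      by_cases h : c = '\\'
      · simp [pvCountLoopA, h, ih]; omega
      · simp [pvCountLoopA, h]

-- B's forward automaton ends in state = parity of the trailing backslash run
theorem escFold_eq (l : List Char) :
    l.foldl (fun esc c => (c == '\\') && !esc) false
      = decide ((l.reverse.takeWhile (· == '\\')).length % 2 = 1) := by
  induction l using List.reverseRecOn with
  | nil => simp
  | append_singleton l c ih =>
      rw [List.foldl_append, ih]
      by_cases h : c = '\\'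
      · simp only [List.foldl_cons, List.foldl_nil, h, List.reverse_append,
          List.reverse_singleton, List.singleton_append, List.takeWhile_cons,
          beq_self_eq_true, if_true, List.length_cons]
        rcases Nat.even_or_odd (l.reverse.takeWhile (· == '\\')).length with he | ho
        · rw [Nat.even_iff] at he
          simp [Nat.add_mod, he]
        · rw [Nat.odd_iff] at ho
          simp [ho, Nat.add_mod]
      · simp [h]

theorem parity_flip (t : Nat) :
    (!(PySem.Int.mod ((t : Int) + 1) 2 == 0)) = !(decide (t % 2 = 1)) := by
  have e1 : PySem.Int.mod ((t : Int) + 1) 2 = ((t : Int) + 1) % 2 := by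
    simp [PySem.Int.mod, Int.fmod_eq_emod]
  rw [e1]
  by_cases h : t % 2 = 1
  · have h1 : ((t : Int) + 1) % 2 = 0 := by omega
    simp [h, h1]
  · have h1 : ((t : Int) + 1) % 2 = 1 := by omega
    simp [h, h1]

-- ===== VERDICT (by name: the statement is the Claim_ definition above) =====
theorem is_escaped_at_index_spec : Claim_equal_is_escaped_at_index := by
  intro s index _
  unfold Spec_is_escaped_at_index is_escaped_at_index is_escaped_at_index_alt
  simp only [escFold_eq, pvCountLoopA_eq, Nat.zero_add, parity_flip]
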